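-- pv_equiv track=rewrite | github.com/orenvlad-ai/wb-core | apps/seller_portal_feedbacks_target_row_probe.py | field_availability_for_rows
-- ===== SOURCE A (Python) =====
-- from typing import Any, Iterable, Mapping
--
-- def field_availability_for_rows(rows: list[dict[str, Any]]) -> dict[str, bool]:
--     fields = (
--         "dom_scout_id",
--         "feedback_id",
--         "hidden_feedback_id",
--         "review_datetime",
--         "review_date",
--         "rating",
--         "nm_id",
--         "supplier_article",
--         "product_title",
--         "text_snippet",
--         "review_tags",
--         "three_dot_menu_found",
--     )
--     return {field: any(bool(row.get(field)) for row in rows) for field in fields}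
-- ===== SOURCE B (Python) =====
-- def field_availability_for_rows(rows):
--     fields = (
--         "dom_scout_id",
--         "feedback_id",
--         "hidden_feedback_id",
--         "review_datetime",
--         "review_date",
--         "rating",
--         "nm_id",
--         "supplier_article",
--         "product_title",
--         "text_snippet",
--         "review_tags",
--         "three_dot_menu_found",
--     )
--     seen = set()
--     for row in rows:
--         for key, value in row.items():
--             if value:
--                 seen.add(key)
--     return {field: field in seen for field in fields}
-- ===== Notes on version B (the rewrite author's own statement) =====
-- stated objective: alternative
-- what changed: A is field-major: for each of the 12 fields it runs a fresh any() scan of all rows via row.get(field); B inverts the data flow: one pass over the rows' own items builds the set of keys seen with a truthy value, and the result dict is then a pure membership lookup per field, with no per-field scanning of rows at all.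
import Mathlib
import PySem

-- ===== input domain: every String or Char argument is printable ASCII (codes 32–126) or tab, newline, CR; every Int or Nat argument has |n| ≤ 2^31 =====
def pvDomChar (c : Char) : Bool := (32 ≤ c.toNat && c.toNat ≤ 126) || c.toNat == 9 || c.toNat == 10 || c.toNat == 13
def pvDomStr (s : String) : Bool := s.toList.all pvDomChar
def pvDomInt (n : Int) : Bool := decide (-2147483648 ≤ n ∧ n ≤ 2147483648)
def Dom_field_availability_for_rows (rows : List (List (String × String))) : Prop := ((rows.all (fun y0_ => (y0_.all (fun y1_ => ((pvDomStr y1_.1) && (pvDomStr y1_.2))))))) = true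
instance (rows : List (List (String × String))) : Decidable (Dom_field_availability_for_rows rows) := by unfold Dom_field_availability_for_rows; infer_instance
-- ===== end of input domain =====

-- B inverts the data flow: instead of A's per-field any() scan of the rows, it collects the set of
-- keys that appear with a truthy value in any row and answers each field by set membership.

-- ===== PORT A =====
def pvFields : List String :=
  ["dom_scout_id", "feedback_id", "hidden_feedback_id", "review_datetime",
   "review_date", "rating", "nm_id", "supplier_article", "product_title",
   "text_snippet", "review_tags", "three_dot_menu_found"]

-- row.get(field) on the association-list model of a dict: first match
def pvGetRow (row : List (String × String)) (f : String) : Option String :=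
  (row.find? (fun p => p.1 == f)).map (·.2)

-- bool(row.get(field)) for a str-valued dict: present and non-empty
def pvTruthy (row : List (String × String)) (f : String) : Bool :=
  match pvGetRow row f with
  | some s => !(s == "")
  | none => false

-- A: field-major — for each field, any() over the rows
def field_availability_for_rows (rows : List (List (String × String))) : List (String × Bool) :=
  pvFields.map (fun field => (field, rows.any (fun row => pvTruthy row field)))

-- ===== PORT B =====
-- B: one pass over the rows' items building the set of keys seen with a truthy value
def pvSeen (rows : List (List (String × String))) : PySem.Set String :=
  rows.foldl
    (fun seen row =>
      row.foldl (fun seen p => if !(p.2 == "") then PySem.Set.add seen p.1 else seen) seen)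
    PySem.Set.empty

def field_availability_for_rows_alt (rows : List (List (String × String))) : List (String × Bool) :=
  let seen := pvSeen rows
  pvFields.map (fun field => (field, PySem.Set.contains seen field))

-- ===== PRECONDITION & SPEC =====
-- Pre_ excludes association lists in which some row carries a duplicate key: such a list is not the
-- image of any Python dict (dict keys are unique), so A's first-match .get and B's items scan are
-- only compared on faithful dict representations.
def Pre_field_availability_for_rows (rows : List (List (String × String))) : Prop :=
  ∀ row ∈ rows, (row.map Prod.fst).Nodup
instance (rows : List (List (String × String))) : Decidable (Pre_field_availability_for_rows rows) := by unfold Pre_field_availability_for_rows; infer_instance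

def pvWitness_field_availability_for_rows : (List (List (String × String))) :=
  [[("rating", "5"), ("nm_id", "")], [("text_snippet", "ok")]]

def Spec_field_availability_for_rows (rows : List (List (String × String))) (out : List (String × Bool)) : Prop := out = field_availability_for_rows_alt rows
instance (rows : List (List (String × String))) (out : List (String × Bool)) : Decidable (Spec_field_availability_for_rows rows out) := by unfold Spec_field_availability_for_rows; infer_instance

-- ===== CLAIM (what is proved, stated in full; the proofs are below) =====
def Claim_equal_field_availability_for_rows : Prop := ∀ (rows : List (List (String × String))), Dom_field_availability_for_rows rows → Pre_field_availability_for_rows rows → Spec_field_availability_for_rows rows (field_availability_for_rows rows)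

-- ===== LEMMAS AND PROOFS =====

-- membership in the inner per-row fold
theorem mem_row_fold (row : List (String × String)) (s : PySem.Set String) (x : String) :
    x ∈ row.foldl (fun seen p => if !(p.2 == "") then PySem.Set.add seen p.1 else seen) s ↔
      x ∈ s ∨ ∃ p ∈ row, p.2 ≠ "" ∧ p.1 = x := by
  induction row generalizing s with
  | nil => simp
  | cons q row ih =>
    rw [List.foldl_cons, ih]
    by_cases h : q.2 = ""
    · simp [h]
    · simp [h, PySem.Set.mem_add]
      tauto

-- membership in pvSeen
theorem mem_pvSeen (rows : List (List (String × String))) (x : String) :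
    x ∈ pvSeen rows ↔ ∃ row ∈ rows, ∃ p ∈ row, p.2 ≠ "" ∧ p.1 = x := by
  unfold pvSeen
  have main : ∀ (rs : List (List (String × String))) (s : PySem.Set String),
      x ∈ rs.foldl (fun seen row =>
          row.foldl (fun seen p => if !(p.2 == "") then PySem.Set.add seen p.1 else seen) seen) s ↔
        x ∈ s ∨ ∃ row ∈ rs, ∃ p ∈ row, p.2 ≠ "" ∧ p.1 = x := by
    intro rs
    induction rs with
    | nil => simp
    | cons r rs ih =>
      intro s
      rw [List.foldl_cons, ih, mem_row_fold, List.exists_mem_cons_iff]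
      exact or_assoc
  rw [main]
  simp [PySem.Set.empty]

-- A's per-row truthiness, characterised on duplicate-free rows
theorem truthy_iff (row : List (String × String)) (h : (row.map Prod.fst).Nodup) (f : String) :
    pvTruthy row f = true ↔ ∃ p ∈ row, p.2 ≠ "" ∧ p.1 = f := by
  induction row with
  | nil => simp [pvTruthy, pvGetRow]
  | cons q row ih =>
    simp only [List.map_cons, List.nodup_cons] at h
    by_cases hk : q.1 = f
    · have hnot : ∀ p ∈ row, p.1 ≠ f := by
        intro p hp hpf
        exact h.1 (by rw [hk, ← hpf]; exact List.mem_map_of_mem hp)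
      have hfind : List.find? (fun p => p.1 == f) (q :: row) = some q := by
        simp [hk]
      simp only [pvTruthy, pvGetRow, hfind, Option.map_some]
      constructor
      · intro hne
        exact ⟨q, List.mem_cons_self .., by simpa using hne, hk⟩
      · rintro ⟨p, hp, hne, hpf⟩
        rcases List.mem_cons.mp hp with rfl | hp'
        · simpa using hne
        · exact absurd hpf (hnot p hp')
    · have : pvTruthy (q :: row) f = pvTruthy row f := by
        simp [pvTruthy, pvGetRow, hk]
      rw [this, ih h.2]
      constructor
      · rintro ⟨p, hp, hx⟩; exact ⟨p, List.mem_cons_of_mem _ hp, hx⟩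
      · rintro ⟨p, hp, hne, hpf⟩
        rcases List.mem_cons.mp hp with rfl | hp'
        · exact absurd hpf hk
        · exact ⟨p, hp', hne, hpf⟩

-- ===== VERDICT (by name: the statement is the Claim_ definition above) =====
theorem field_availability_for_rows_spec : Claim_equal_field_availability_for_rows := by
  intro rows _ hpre
  unfold Spec_field_availability_for_rows field_availability_for_rows field_availability_for_rows_alt
  apply List.map_congr_left
  intro f _
  congr 1
  have hmem : PySem.Set.contains (pvSeen rows) f = true ↔ f ∈ pvSeen rows := by
    simp [PySem.Set.contains]
  rw [Bool.eq_iff_iff, List.any_eq_true, hmem, mem_pvSeen]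
  constructor
  · rintro ⟨row, hrow, ht⟩
    obtain ⟨p, hp, h1, h2⟩ := (truthy_iff row (hpre row hrow) f).mp ht
    exact ⟨row, hrow, p, hp, h1, h2⟩
  · rintro ⟨row, hrow, p, hp, h1, h2⟩
    exact ⟨row, hrow, (truthy_iff row (hpre row hrow) f).mpr ⟨p, hp, h1, h2⟩⟩
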